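-- pv_equiv track=rewrite | github.com/Brayan-Chaparro/Barberia-Elite | python chatbot_barberia.py | obtener_horas_disponibles
-- ===== SOURCE A (Python) =====
-- HORARIOS = [
--     "9:00","10:00","11:00","12:00",
--     "14:00","15:00","16:00","17:00","18:00"
-- ]
--
-- def obtener_horas_disponibles(citas, dia):
--     horas_ocupadas = []
--     for cita in citas:
--         if cita.get("fecha") == dia:
--             horas_ocupadas.append(cita.get("hora"))
--
--     disponibles = []
--     for hora in HORARIOS:
--         if hora not in horas_ocupadas:
--             disponibles.append(hora)
--
--     return disponibles
-- ===== SOURCE B (Python) =====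
-- HORARIOS = [
--     "9:00","10:00","11:00","12:00",
--     "14:00","15:00","16:00","17:00","18:00"
-- ]
--
-- def obtener_horas_disponibles(citas, dia):
--     return [h for h in HORARIOS
--             if not any(c.get("fecha") == dia and c.get("hora") == h for c in citas)]
-- ===== Notes on version B (the rewrite author's own statement) =====
-- stated objective: simpler
-- what changed: B drops the intermediate horas_ocupadas list entirely and returns a single comprehension over HORARIOS, testing each slot with an inline any() scan of citas instead of building an occupied index first.
import Mathlib
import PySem

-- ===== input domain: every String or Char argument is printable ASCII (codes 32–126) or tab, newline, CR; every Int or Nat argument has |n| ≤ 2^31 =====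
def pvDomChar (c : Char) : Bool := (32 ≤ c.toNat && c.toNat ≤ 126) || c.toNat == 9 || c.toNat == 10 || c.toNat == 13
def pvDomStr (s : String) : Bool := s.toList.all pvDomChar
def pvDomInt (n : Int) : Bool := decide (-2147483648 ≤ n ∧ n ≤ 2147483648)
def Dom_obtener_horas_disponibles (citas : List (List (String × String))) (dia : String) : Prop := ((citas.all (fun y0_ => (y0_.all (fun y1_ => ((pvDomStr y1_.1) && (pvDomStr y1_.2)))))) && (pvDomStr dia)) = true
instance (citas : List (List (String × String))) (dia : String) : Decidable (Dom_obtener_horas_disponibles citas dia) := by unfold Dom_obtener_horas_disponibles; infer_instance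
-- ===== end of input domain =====

-- B is a single filter over HORARIOS with an inline scan of citas; no occupied index is built (objective: simpler).
-- ===== PORT A =====
def HORARIOS : List String := ["9:00","10:00","11:00","12:00","14:00","15:00","16:00","17:00","18:00"]

-- cita.get(k): first-match lookup on the association list (Python dict .get)
def pvGet (cita : List (String × String)) (k : String) : Option String :=
  (PySem.Dict.mk cita).get? k

def obtener_horas_disponibles (citas : List (List (String × String))) (dia : String) : List String :=
  let horas_ocupadas := citas.foldl
    (fun acc cita => if pvGet cita "fecha" == some dia then acc ++ [pvGet cita "hora"] else acc) []
  HORARIOS.foldl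
    (fun disponibles hora => if some hora ∉ horas_ocupadas then disponibles ++ [hora] else disponibles) []

-- ===== PORT B =====
def obtener_horas_disponibles_alt (citas : List (List (String × String))) (dia : String) : List String :=
  HORARIOS.filter (fun h =>
    !(citas.any (fun c => pvGet c "fecha" == some dia && pvGet c "hora" == some h)))

-- ===== PRECONDITION & SPEC =====
def Spec_obtener_horas_disponibles (citas : List (List (String × String))) (dia : String) (out : List String) : Prop := out = obtener_horas_disponibles_alt citas dia
instance (citas : List (List (String × String))) (dia : String) (out : List String) : Decidable (Spec_obtener_horas_disponibles citas dia out) := by unfold Spec_obtener_horas_disponibles; infer_instance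

-- ===== CLAIM (what is proved, stated in full; the proofs are below) =====
def Claim_equal_obtener_horas_disponibles : Prop := ∀ (citas : List (List (String × String))) (dia : String), Dom_obtener_horas_disponibles citas dia → Spec_obtener_horas_disponibles citas dia (obtener_horas_disponibles citas dia)

-- ===== LEMMAS AND PROOFS =====

lemma pv_filter_shape (occ : List (Option String)) :
    HORARIOS.foldl (fun d h => if some h ∉ occ then d ++ [h] else d) [] =
    HORARIOS.filter (fun h => !(occ.contains (some h))) := by
  rw [show (fun h => !(occ.contains (some h))) = (fun h => decide (some h ∉ occ)) from by
    funext h; simp]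
  exact PySem.List.foldl_append_ite_eq_filter _ _ _

lemma pv_pred_eq (citas : List (List (String × String))) (dia h : String) :
    (!(((citas.filter (fun c => pvGet c "fecha" == some dia)).map (fun c => pvGet c "hora")).contains (some h))) =
    (!(citas.any (fun c => pvGet c "fecha" == some dia && pvGet c "hora" == some h))) := by
  congr 1
  rw [Bool.eq_iff_iff]
  simp only [List.contains_eq_mem, decide_eq_true_eq, List.mem_map, List.mem_filter,
    List.any_eq_true, Bool.and_eq_true, beq_iff_eq]
  constructor
  · rintro ⟨c, ⟨hc, hf⟩, hh⟩
    exact ⟨c, hc, hf, hh⟩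
  · rintro ⟨c, hc, hf, hh⟩
    exact ⟨c, ⟨hc, hf⟩, hh⟩

-- ===== VERDICT (by name: the statement is the Claim_ definition above) =====
theorem obtener_horas_disponibles_spec : Claim_equal_obtener_horas_disponibles := by
  intro citas dia _
  unfold Spec_obtener_horas_disponibles obtener_horas_disponibles obtener_horas_disponibles_alt
  rw [PySem.List.foldl_append_if]
  rw [pv_filter_shape]
  exact List.filter_congr (fun h _ => pv_pred_eq citas dia h)
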